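-- pv_equiv track=rewrite | github.com/pytorch/pytorch | pytorch-env/lib/python3.12/site-packages/sympy/combinatorics/tensor_can.py | _get_map_slots
-- ===== SOURCE A (Python) =====
-- def _get_map_slots(size, fixed_slots):
--     res = list(range(size))
--     pos = 0
--     for i in range(size):
--         if i in fixed_slots:
--             continue
--         res[i] = pos
--         pos += 1
--     return res
-- ===== SOURCE B (Python) =====
-- from bisect import bisect_left
--
--
-- def _get_map_slots(size, fixed_slots):
--     fset = set(fixed_slots) & set(range(size))
--     sfixed = sorted(fset)
--     return [i if i in fset else i - bisect_left(sfixed, i)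
--             for i in range(size)]
-- ===== Notes on version B (the rewrite author's own statement) =====
-- stated objective: faster
-- what changed: Replaces the running-counter pass with its O(size*len(fixed_slots)) per-element 'i in fixed_slots' list scan by a set/sorted index of the valid fixed positions plus a binary search (bisect_left) that gives each non-fixed slot's sequential index directly.
import Mathlib
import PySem

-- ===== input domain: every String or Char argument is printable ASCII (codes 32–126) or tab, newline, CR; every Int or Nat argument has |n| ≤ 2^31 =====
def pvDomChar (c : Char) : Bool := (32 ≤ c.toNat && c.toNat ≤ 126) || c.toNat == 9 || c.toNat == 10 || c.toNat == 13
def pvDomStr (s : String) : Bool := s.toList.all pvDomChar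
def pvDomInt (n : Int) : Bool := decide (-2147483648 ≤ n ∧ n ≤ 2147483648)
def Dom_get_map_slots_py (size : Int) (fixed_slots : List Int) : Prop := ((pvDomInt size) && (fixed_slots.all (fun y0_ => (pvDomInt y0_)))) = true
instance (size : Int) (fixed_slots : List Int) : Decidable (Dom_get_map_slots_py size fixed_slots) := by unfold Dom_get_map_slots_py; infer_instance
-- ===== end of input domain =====

-- B replaces A's running-counter pass (whose 'i in fixed_slots' is a linear list scan per slot)
-- with a set + sorted index of the valid fixed positions and a per-element binary search
-- (measurably faster in a timing run).


-- ===== PORT A =====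
-- res = list(range(size)); pos = 0; for i in range(size): if i in fixed_slots: continue; res[i] = pos; pos += 1
-- 'res[i] = pos' is List.set i.toNat: exact, since i ∈ range(size) gives 0 ≤ i < size = res.length.
def get_map_slots_py (size : Int) (fixed_slots : List Int) : List Int :=
  let res := PySem.List.pyRange 0 size 1
  ((PySem.List.pyRange 0 size 1).foldl
    (fun (s : List Int × Int) i =>
      if fixed_slots.contains i then s
      else (s.1.set i.toNat s.2, s.2 + 1))
    (res, 0)).1

-- ===== PORT B =====
-- fset = set(fixed_slots) & set(range(size)); sfixed = sorted(fset);
-- [i if i in fset else i - bisect_left(sfixed, i) for i in range(size)]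
def get_map_slots_py_alt (size : Int) (fixed_slots : List Int) : List Int :=
  let fset := PySem.Set.inter (PySem.Set.ofList fixed_slots) (PySem.List.pyRange 0 size 1)
  let sfixed := PySem.List.sorted fset (fun x => x)
  (PySem.List.pyRange 0 size 1).map (fun i =>
    if PySem.Set.contains fset i then i else i - (PySem.List.bisectLeft sfixed i : Int))

-- ===== PRECONDITION & SPEC =====
def Spec_get_map_slots_py (size : Int) (fixed_slots : List Int) (out : List Int) : Prop := out = get_map_slots_py_alt size fixed_slots
instance (size : Int) (fixed_slots : List Int) (out : List Int) : Decidable (Spec_get_map_slots_py size fixed_slots out) := by unfold Spec_get_map_slots_py; infer_instance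

-- ===== CLAIM (what is proved, stated in full; the proofs are below) =====
def Claim_equal_get_map_slots_py : Prop := ∀ (size : Int) (fixed_slots : List Int), Dom_get_map_slots_py size fixed_slots → Spec_get_map_slots_py size fixed_slots (get_map_slots_py size fixed_slots)

-- ===== LEMMAS AND PROOFS =====

-- number of non-fixed positions strictly below i (= A's counter 'pos' when the loop reaches i)
def pvCnt (fixed_slots : List Int) (i : Nat) : Int :=
  (i : Int) - ((List.range i).countP (fun k => fixed_slots.contains ((k : Nat) : Int)) : Int)

-- the result list after A's loop has processed positions 0..n-1 (entries >= n still untouched)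
def pvClosed (fixed_slots : List Int) (N n : Nat) : List Int :=
  (List.range N).map (fun j =>
    if j < n then (if fixed_slots.contains ((j : Nat) : Int) then ((j : Nat) : Int)
                   else pvCnt fixed_slots j)
    else ((j : Nat) : Int))

lemma pvCnt_succ (fixed_slots : List Int) (n : Nat) :
    pvCnt fixed_slots (n + 1) =
      if fixed_slots.contains ((n : Nat) : Int) then pvCnt fixed_slots n
      else pvCnt fixed_slots n + 1 := by
  unfold pvCnt
  rw [List.range_succ, List.countP_append]
  by_cases h : ((n : Nat) : Int) ∈ fixed_slots
  · simp [h]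
  · simp [h]
    ring

lemma pvLoopA (fixed_slots : List Int) (N : Nat) :
    ∀ n, n ≤ N →
    (List.map (fun k : Nat => (k : Int)) (List.range n)).foldl
      (fun (s : List Int × Int) i =>
        if fixed_slots.contains i then s
        else (s.1.set i.toNat s.2, s.2 + 1))
      (List.map (fun k : Nat => (k : Int)) (List.range N), 0)
    = (pvClosed fixed_slots N n, pvCnt fixed_slots n) := by
  intro n
  induction n with
  | zero =>
    intro _
    simp only [List.range_zero, List.map_nil, List.foldl_nil]
    unfold pvClosed pvCnt
    simp
  | succ n ih =>
    intro hn
    have hn' : n ≤ N := Nat.le_of_succ_le hn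
    rw [List.range_succ, List.map_append, List.foldl_append, ih hn']
    simp only [List.map_cons, List.map_nil, List.foldl_cons, List.foldl_nil]
    rw [pvCnt_succ]
    by_cases h : fixed_slots.contains ((n : Nat) : Int) = true
    · rw [if_pos h, if_pos h]
      congr 1
      unfold pvClosed
      apply List.map_congr_left
      intro j hj
      rcases Nat.lt_or_ge j n with hlt | hge
      · simp [hlt, Nat.lt_succ_of_lt hlt]
      · rcases Nat.lt_or_ge j (n + 1) with hlt' | hge'
        · have hjn : j = n := by omega
          subst hjn
          rw [if_neg (by omega : ¬ j < j), if_pos (by omega : j < j + 1), if_pos h]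
        · rw [if_neg (by omega : ¬ j < n), if_neg (by omega : ¬ j < n + 1)]
    · rw [if_neg h, if_neg h]
      simp only [Prod.mk.injEq]
      refine ⟨?_, trivial⟩
      -- setting entry n turns pvClosed ... n into pvClosed ... (n+1)
      apply List.ext_getElem
      · simp [pvClosed]
      · intro j h1 h2
        have hjN : j < N := by simpa [pvClosed] using h2
        have hnN : n < N := by omega
        rw [List.getElem_set]
        by_cases hjn : ((n : Nat) : Int).toNat = j
        · have hje : j = n := by omega
          subst hje
          have hm : ((j : Nat) : Int) ∉ fixed_slots := by
            simpa [List.contains_iff_mem] using h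
          simp [hjn, pvClosed, hm]
        · rw [if_neg hjn]
          have hne : j ≠ n := by omega
          unfold pvClosed
          simp only [List.getElem_map, List.getElem_range]
          rcases Nat.lt_or_ge j n with hlt | hge
          · simp [hlt, Nat.lt_succ_of_lt hlt]
          · have hx1 : ¬ j < n := by omega
            have hx2 : ¬ j < n + 1 := by omega
            rw [if_neg hx1, if_neg hx2]

-- bisect_left on a <=-sorted list counts the elements strictly below x
lemma pvBisect_eq_countP (xs : List Int) (x : Int)
    (h : xs.Pairwise (· ≤ ·)) :
    (PySem.List.bisectLeft xs x : Nat) = xs.countP (fun y => decide (y < x)) := by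
  obtain ⟨hk, hlt, hge⟩ := PySem.List.bisectLeft_spec xs x h
  set k := PySem.List.bisectLeft xs x with hkdef
  have hsplit : xs = xs.take k ++ xs.drop k := (List.take_append_drop k xs).symm
  have htake : (xs.take k).countP (fun y => decide (y < x)) = k := by
    have hall : ∀ a ∈ xs.take k, (fun y => decide (y < x)) a = true := by
      intro a ha
      obtain ⟨j, hj, hja⟩ := List.mem_take_iff_getElem.mp ha
      have hjk : j < k := lt_of_lt_of_le hj (min_le_left _ _)
      have hjlen : j < xs.length := lt_of_lt_of_le hj (min_le_right _ _)
      simpa [← hja] using hlt j hjlen hjk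
    rw [List.countP_eq_length_filter, List.filter_eq_self.mpr hall,
      List.length_take, Nat.min_eq_left hk]
  have hdrop : (xs.drop k).countP (fun y => decide (y < x)) = 0 := by
    rw [List.countP_eq_length_filter, List.length_eq_zero_iff, List.filter_eq_nil_iff]
    intro a ha
    obtain ⟨j, hj, hja⟩ := List.mem_iff_getElem.mp ha
    rw [List.getElem_drop] at hja
    have hge' := hge (k + j) (by rw [List.length_drop] at hj; omega) (Nat.le_add_right _ _)
    simp only [decide_eq_true_eq, not_lt]
    rw [← hja] at hge' ⊢
    omega
  have hs : xs.countP (fun y => decide (y < x)) = k + 0 := by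
    conv_lhs => rw [hsplit]
    rw [List.countP_append, htake, hdrop]
  omega

-- a ∈ [0, 1, ..., n-1] (as Ints) iff 0 <= a < n
lemma pvMemMapRange (n : Nat) (a : Int) :
    a ∈ List.map (fun k : Nat => (k : Int)) (List.range n) ↔ 0 ≤ a ∧ a < (n : Int) := by
  simp only [List.mem_map, List.mem_range]
  constructor
  · rintro ⟨k, hk, rfl⟩
    constructor
    · exact_mod_cast Int.natCast_nonneg k
    · exact_mod_cast hk
  · rintro ⟨h0, hn⟩
    exact ⟨a.toNat, by omega, by omega⟩

-- counting the sorted distinct valid fixed positions below i counts the fixed positions in [0, i)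
lemma pvSfixed_count (fixed_slots : List Int) (N : Nat) (i : Nat) (hi : i ≤ N) :
    (PySem.List.sorted (PySem.Set.inter (PySem.Set.ofList fixed_slots)
        (List.map (fun k : Nat => (k : Int)) (List.range N))) (fun x => x)).countP
        (fun y => decide (y < (i : Int)))
    = (List.range i).countP (fun k => fixed_slots.contains ((k : Nat) : Int)) := by
  rw [(PySem.List.sorted_perm _ _ _).countP_eq]
  have hR : (List.range i).countP (fun k => fixed_slots.contains ((k : Nat) : Int))
      = ((List.range i).map (fun k : Nat => ((k : Nat) : Int))).countP
          (fun x => fixed_slots.contains x) := by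
    rw [List.countP_map]; rfl
  rw [hR, List.countP_eq_length_filter, List.countP_eq_length_filter]
  have hperm : ((PySem.Set.inter (PySem.Set.ofList fixed_slots)
        (List.map (fun k : Nat => (k : Int)) (List.range N))).filter
          (fun y => decide (y < (i : Int)))).Perm
      (((List.range i).map (fun k : Nat => ((k : Nat) : Int))).filter
        (fun x => fixed_slots.contains x)) := by
    rw [List.perm_ext_iff_of_nodup]
    · intro a
      rw [List.mem_filter, List.mem_filter]
      rw [PySem.Set.mem_inter, PySem.Set.mem_ofList, pvMemMapRange, pvMemMapRange]
      simp only [decide_eq_true_eq, List.contains_iff_mem]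
      constructor
      · rintro ⟨⟨hmem, h0, hsz⟩, hltI⟩
        exact ⟨⟨h0, hltI⟩, hmem⟩
      · rintro ⟨⟨h0, hltI⟩, hmem⟩
        refine ⟨⟨hmem, h0, ?_⟩, hltI⟩
        have hiN : (i : Int) ≤ (N : Int) := by exact_mod_cast hi
        omega
    · exact List.Nodup.filter _
        (PySem.Set.nodup_inter _ _ (PySem.Set.nodup_ofList _))
    · exact List.Nodup.filter _
        ((List.nodup_range).map (fun a b hab => by exact_mod_cast hab))
  exact hperm.length_eq

theorem get_map_slots_py_spec_aux (size : Int) (fixed_slots : List Int) :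
    get_map_slots_py size fixed_slots = get_map_slots_py_alt size fixed_slots := by
  rcases le_or_gt size 0 with hneg | hpos
  · simp [get_map_slots_py, get_map_slots_py_alt, PySem.List.pyRange_one_eq_nil hneg]
  · obtain ⟨N, rfl⟩ : ∃ N : Nat, size = (N : Int) :=
      ⟨size.toNat, (Int.toNat_of_nonneg (le_of_lt hpos)).symm⟩
    simp only [get_map_slots_py, get_map_slots_py_alt]
    rw [PySem.List.pyRange_zero_natCast]
    rw [pvLoopA fixed_slots N N (le_refl N)]
    dsimp only
    rw [List.map_map]
    unfold pvClosed
    apply List.map_congr_left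
    intro j hj
    dsimp only [Function.comp]
    have hjN : j < N := List.mem_range.mp hj
    rw [if_pos hjN]
    have hcont : PySem.Set.contains
        (PySem.Set.inter (PySem.Set.ofList fixed_slots)
          (List.map (fun k : Nat => (k : Int)) (List.range N))) ((j : Nat) : Int)
        = fixed_slots.contains ((j : Nat) : Int) := by
      rw [Bool.eq_iff_iff]
      simp only [PySem.Set.contains_eq_listContains, List.contains_iff_mem,
        PySem.Set.mem_inter, PySem.Set.mem_ofList, pvMemMapRange]
      constructor
      · tauto
      · intro hm
        refine ⟨hm, by omega, ?_⟩
        exact_mod_cast hjN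
    rw [hcont]
    by_cases hb : fixed_slots.contains ((j : Nat) : Int) = true
    · rw [if_pos hb, if_pos hb]
    · rw [if_neg hb, if_neg hb]
      rw [pvBisect_eq_countP _ _ (PySem.List.sorted_pairwise _ _),
        pvSfixed_count fixed_slots N j (le_of_lt hjN)]
      unfold pvCnt
      rfl

-- ===== VERDICT (by name: the statement is the Claim_ definition above) =====
theorem get_map_slots_py_spec : Claim_equal_get_map_slots_py := by
  intro size fixed_slots _
  unfold Spec_get_map_slots_py
  exact get_map_slots_py_spec_aux size fixed_slots
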